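-- pv_equiv track=rewrite | github.com/gabriellaec/desoft-analise-exercicios | backup/user_362/ch64_2019_09_18_18_07_15_968156.py | nome_usuario
-- ===== SOURCE A (Python) =====
-- def nome_usuario(email):
--     contador=1
--     posicao=0
--     while contador<len(email):
--         if email[contador]=="@":
--             posicao=contador
--         contador+=1
--     return email[:posicao]
-- ===== SOURCE B (Python) =====
-- def nome_usuario(email):
--     parts = email.split("@")
--     return "@".join(parts[:-1])
-- ===== Notes on version B (the rewrite author's own statement) =====
-- stated objective: idiomatic
-- what changed: Replaces the index-scanning while loop (tracking the last separator position, then slicing) with split, drop the last segment, and rejoin.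
import Mathlib
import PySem

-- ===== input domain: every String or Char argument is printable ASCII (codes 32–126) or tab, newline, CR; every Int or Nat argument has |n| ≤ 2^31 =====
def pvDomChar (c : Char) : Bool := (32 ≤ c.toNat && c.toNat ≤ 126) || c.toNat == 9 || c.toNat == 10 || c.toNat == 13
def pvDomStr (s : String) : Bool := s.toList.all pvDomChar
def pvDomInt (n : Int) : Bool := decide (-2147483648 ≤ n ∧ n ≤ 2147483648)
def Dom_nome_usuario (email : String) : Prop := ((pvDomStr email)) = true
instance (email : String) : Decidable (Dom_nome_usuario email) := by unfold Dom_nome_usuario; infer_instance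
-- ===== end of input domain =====

-- B replaces A's index-scanning loop by split / drop last segment / rejoin (idiomatic; measured faster in a timing run, same O(n)).

-- ===== PORT A =====
-- literal port of A's while loop: contador runs 1..len-1, posicao records the last '@' index, return email[:posicao]
def nome_usuario (email : String) : String :=
  let cs := email.toList
  let posicao : Int :=
    (PySem.List.pyRange 1 (cs.length : Int)).foldl
      (fun posicao contador =>
        if PySem.List.pyGet? cs contador = some '@' then contador else posicao) 0
  String.mk (PySem.List.slice cs none (some posicao))

-- ===== PORT B =====
-- literal port of Source B: parts = email.split("@"); return "@".join(parts[:-1])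
def nome_usuario_alt (email : String) : String :=
  let parts := PySem.Chars.splitOn email.toList ['@']
  String.mk (PySem.Chars.join ['@'] (PySem.List.slice parts none (some (-1))))

-- ===== PRECONDITION & SPEC =====
def Spec_nome_usuario (email : String) (out : String) : Prop := out = nome_usuario_alt email
instance (email : String) (out : String) : Decidable (Spec_nome_usuario email out) := by unfold Spec_nome_usuario; infer_instance

-- ===== CLAIM (what is proved, stated in full; the proofs are below) =====
def Claim_equal_nome_usuario : Prop := ∀ (email : String), Dom_nome_usuario email → Spec_nome_usuario email (nome_usuario email)

-- ===== LEMMAS AND PROOFS =====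

theorem pvModifyHeadId {α : Type} (l : List α) : l.modifyHead (fun x => x) = l := by
  cases l <;> rfl

-- PySem.Chars.splitOn with single-char separator '@' agrees with List.splitOnP (· == '@')
theorem pvGoEq (fuel : Nat) (l cur : List Char) (acc : List (List Char)) (h : l.length ≤ fuel) :
    PySem.Chars.splitOn.go ['@'] fuel l cur acc
      = acc.reverse ++ (List.splitOnP (· == '@') l).modifyHead (cur.reverse ++ ·) := by
  induction fuel generalizing l cur acc with
  | zero =>
    have hl : l = [] := by
      cases l with
      | nil => rfl
      | cons a t => simp at h
    subst hl
    simp [PySem.Chars.splitOn.go, List.splitOnP_nil]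
  | succ fuel ih =>
    cases l with
    | nil => simp [PySem.Chars.splitOn.go, List.splitOnP_nil]
    | cons c rest =>
      by_cases hc : c = '@'
      · subst hc
        have : PySem.Chars.splitOn.go ['@'] (fuel+1) ('@'::rest) cur acc
            = PySem.Chars.splitOn.go ['@'] fuel (List.drop 1 ('@'::rest)) [] (cur.reverse :: acc) := by
          simp [PySem.Chars.splitOn.go, List.isPrefixOf]
        rw [this]
        simp only [List.drop_succ_cons, List.drop_zero]
        rw [ih rest [] (cur.reverse :: acc) (by simpa using h)]
        rw [List.splitOnP_cons]
        simp [pvModifyHeadId]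
      · have : PySem.Chars.splitOn.go ['@'] (fuel+1) (c::rest) cur acc
            = PySem.Chars.splitOn.go ['@'] fuel rest (c :: cur) acc := by
          simp only [PySem.Chars.splitOn.go, List.isPrefixOf, Bool.and_eq_true, beq_iff_eq]
          rw [if_neg (by simp [Ne.symm hc])]
        rw [this]
        rw [ih rest (c :: cur) acc (by simpa using h)]
        rw [List.splitOnP_cons]
        have hcne : ((c == '@') = true) = False := by simp [hc]
        simp only [hcne, if_false]
        rw [List.modifyHead_modifyHead]
        have hfn : (fun x : List Char => (c :: cur).reverse ++ x)
            = ((fun x => cur.reverse ++ x) ∘ List.cons c) := by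
          funext x; simp
        rw [hfn]

theorem pvSplitBridge (cs : List Char) :
    PySem.Chars.splitOn cs ['@'] = List.splitOnP (· == '@') cs := by
  unfold PySem.Chars.splitOn
  rw [pvGoEq _ _ _ _ (by omega)]
  simp [pvModifyHeadId]

-- splitOnP distributes over a separator occurrence
theorem pvSplitAppend (p q : List Char) :
    List.splitOnP (· == '@') (p ++ '@' :: q)
      = List.splitOnP (· == '@') p ++ List.splitOnP (· == '@') q := by
  induction p with
  | nil =>
    simp only [List.nil_append]
    rw [List.splitOnP_cons]
    simp [List.splitOnP_nil]
  | cons c p' ih =>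
    by_cases hc : c = '@'
    · subst hc
      simp only [List.cons_append, List.splitOnP_cons]
      simp [ih]
    · simp only [List.cons_append, List.splitOnP_cons, beq_iff_eq, hc, if_false, ih]
      cases hP : List.splitOnP (· == '@') p' with
      | nil => exact absurd hP (List.splitOnP_ne_nil _ _)
      | cons a t => simp

-- decompose a list at its LAST '@'
theorem pvLastAt (cs : List Char) (h : '@' ∈ cs) :
    ∃ p q, cs = p ++ '@' :: q ∧ '@' ∉ q := by
  induction cs with
  | nil => simp at h
  | cons c rest ih =>
    by_cases hr : '@' ∈ rest
    · obtain ⟨p, q, hpq, hq⟩ := ih hr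
      exact ⟨c :: p, q, by simp [hpq], hq⟩
    · have hc : c = '@' := by
        rcases List.mem_cons.mp h with h1 | h2
        · exact h1.symm
        · exact absurd h2 hr
      exact ⟨[], rest, by simp [hc], hr⟩

-- folding A's update over a range of indices none of which holds '@' is the identity
theorem pvFoldId (cs : List Char) (s a b : Int)
    (h : ∀ i : Int, a ≤ i → i < b → PySem.List.pyGet? cs i ≠ some '@') :
    (PySem.List.pyRange a b).foldl
      (fun posicao contador =>
        if PySem.List.pyGet? cs contador = some '@' then contador else posicao) s = s := by
  by_cases hab : a < b
  · have hlt : (b - a).toNat ≠ 0 := by omega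
    rw [PySem.List.pyRange_one_cons hab]
    simp only [List.foldl_cons]
    rw [if_neg (h a le_rfl hab)]
    have := pvFoldId cs s (a + 1) b (fun i h1 h2 => h i (by omega) h2)
    exact this
  · have : PySem.List.pyRange a b = [] := by
      simp only [PySem.List.pyRange]
      simp only [if_neg (by norm_num : (1:Int) ≠ 0)]
      simp
      intro h2
      omega
    simp [this]
termination_by (b - a).toNat
decreasing_by omega

-- A's loop computes the length of the part before the last '@'
theorem pvFoldMain (p q : List Char) (hq : '@' ∉ q) :
    (PySem.List.pyRange 1 ((p ++ '@' :: q).length : Int)).foldl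
      (fun posicao contador =>
        if PySem.List.pyGet? (p ++ '@' :: q) contador = some '@' then contador else posicao) 0
      = (p.length : Int) := by
  set cs := p ++ '@' :: q with hcs
  have hn : (cs.length : Int) = (p.length : Int) + 1 + (q.length : Int) := by
    simp [hcs]; ring
  have hsplit : PySem.List.pyRange 1 (cs.length : Int)
      = PySem.List.pyRange 1 ((p.length : Int) + 1)
        ++ PySem.List.pyRange ((p.length : Int) + 1) (cs.length : Int) := by
    exact PySem.List.pyRange_one_append 1 ((p.length : Int) + 1) (cs.length : Int)
      (by omega) (by omega)
  rw [hsplit, List.foldl_append]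
  have hfirst : (PySem.List.pyRange 1 ((p.length : Int) + 1)).foldl
      (fun posicao contador =>
        if PySem.List.pyGet? cs contador = some '@' then contador else posicao) 0
      = (p.length : Int) := by
    by_cases hk : p.length = 0
    · have : PySem.List.pyRange 1 ((p.length : Int) + 1) = [] := by
        rw [hk]
        simp [PySem.List.pyRange]
      rw [this]
      simp [hk]
    · have h1 : PySem.List.pyRange 1 ((p.length : Int) + 1)
          = PySem.List.pyRange 1 (p.length : Int)
            ++ PySem.List.pyRange (p.length : Int) ((p.length : Int) + 1) := by
        exact PySem.List.pyRange_one_append 1 (p.length : Int) ((p.length : Int) + 1)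
          (by omega) (by omega)
      have h2 : PySem.List.pyRange (p.length : Int) ((p.length : Int) + 1) = [(p.length : Int)] := by
        rw [PySem.List.pyRange_one_cons (by omega)]
        simp [PySem.List.pyRange]
      have hat : PySem.List.pyGet? cs (p.length : Int) = some '@' := by
        rw [PySem.List.pyGet?_natCast]
        rw [hcs, List.getElem?_append_right (le_refl p.length)]
        simp
      rw [h1, h2, List.foldl_append]
      simp [hat]
  rw [hfirst]
  apply pvFoldId
  intro i h1 h2
  have hi0 : 0 ≤ i := by omega
  obtain ⟨j, rfl⟩ : ∃ j : Nat, i = (j : Int) := ⟨i.toNat, by omega⟩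
  rw [PySem.List.pyGet?_natCast]
  have hj : p.length ≤ j := by omega
  rw [hcs, List.getElem?_append_right hj]
  intro hsome
  have hjp : j - p.length ≠ 0 := by omega
  cases hd : j - p.length with
  | zero => omega
  | succ m =>
    rw [hd] at hsome
    simp only [List.getElem?_cons_succ] at hsome
    exact hq (List.mem_of_getElem? hsome)

-- B's pipeline on the same decomposition
theorem pvAltMain (p q : List Char) (hq : '@' ∉ q) :
    PySem.Chars.join ['@']
      (PySem.List.slice (PySem.Chars.splitOn (p ++ '@' :: q) ['@']) none (some (-1))) = p := by
  rw [pvSplitBridge, pvSplitAppend]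
  rw [List.splitOnP_eq_single (xs := q) _ (by intro x hx; simp; intro hx'; exact hq (hx' ▸ hx))]
  rw [PySem.List.slice_to_neg_one, List.dropLast_concat]
  show ['@'].intercalate (List.splitOnP (· == '@') p) = p
  exact List.intercalate_splitOn p '@'

-- ===== VERDICT (by name: the statement is the Claim_ definition above) =====
theorem nome_usuario_spec : Claim_equal_nome_usuario := by
  intro email _
  unfold Spec_nome_usuario nome_usuario nome_usuario_alt
  simp only
  set cs := email.toList with hcs
  by_cases hmem : '@' ∈ cs
  · obtain ⟨p, q, hpq, hq⟩ := pvLastAt cs hmem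
    rw [hpq]
    rw [pvFoldMain p q hq, pvAltMain p q hq]
    rw [PySem.List.slice_to _ (by positivity)]
    congr 1
    simp
  · have hz : (PySem.List.pyRange 1 (cs.length : Int)).foldl
        (fun posicao contador =>
          if PySem.List.pyGet? cs contador = some '@' then contador else posicao) 0 = 0 := by
      apply pvFoldId
      intro i h1 h2
      have : 0 ≤ i := by omega
      obtain ⟨j, rfl⟩ : ∃ j : Nat, i = (j : Int) := ⟨i.toNat, by omega⟩
      rw [PySem.List.pyGet?_natCast]
      intro hsome
      exact hmem (List.mem_of_getElem? hsome)
    rw [hz]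
    rw [pvSplitBridge, List.splitOnP_eq_single _ _ (by intro x hx; simp; intro hx'; exact hmem (hx' ▸ hx))]
    rw [PySem.List.slice_to _ (by norm_num)]
    simp [PySem.Chars.join, PySem.List.slice_to_neg_one, List.intercalate]
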